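-- pv_equiv track=rewrite | github.com/RohanAwhad/fun_podsmart_summarizer | src/pdf_reader.py | correct_punctuation
-- ===== SOURCE A (Python) =====
-- def correct_punctuation(text):
--     corrections = {
--         ' .': '.',
--         ' ,': ',',
--         ' !': '!',
--         ' ?': '?',
--         ' :': ':',
--         ' ;': ';',
--         '( ': '(',
--         ' )': ')',
--     }
--     for wrong, right in corrections.items():
--         text = text.replace(wrong, right)
--     return text
-- ===== SOURCE B (Python) =====
-- def correct_punctuation(text):
--     punct = {'.', ',', '!', '?', ':', ';', ')'}
--     out = []
--     for i, c in enumerate(text):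
--         if c == ' ' and ((i > 0 and text[i - 1] == '(') or (i + 1 < len(text) and text[i + 1] in punct)):
--             continue
--         out.append(c)
--     return ''.join(out)
-- ===== Notes on version B (the rewrite author's own statement) =====
-- stated objective: alternative
-- what changed: Replaces the 8 sequential whole-string str.replace sweeps by one left-to-right scan that keeps or drops each character based on its original neighbors (space dropped after an opening parenthesis or before punctuation).
import Mathlib
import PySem

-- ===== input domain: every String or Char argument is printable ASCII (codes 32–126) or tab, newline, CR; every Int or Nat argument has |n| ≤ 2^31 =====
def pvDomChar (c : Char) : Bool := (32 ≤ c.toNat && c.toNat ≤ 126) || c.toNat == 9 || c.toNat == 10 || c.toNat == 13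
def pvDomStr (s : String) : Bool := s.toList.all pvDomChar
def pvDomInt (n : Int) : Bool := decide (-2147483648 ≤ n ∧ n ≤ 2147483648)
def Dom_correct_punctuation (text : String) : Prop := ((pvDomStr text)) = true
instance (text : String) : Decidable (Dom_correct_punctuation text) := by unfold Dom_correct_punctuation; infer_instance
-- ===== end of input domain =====

-- B replaces A's 8 sequential str.replace sweeps by one left-to-right scan deciding each
-- character from its original neighbors; same return value (alternative single-pass algorithm).

-- ===== PORT A =====
def correct_punctuation (text : String) : String :=
  let corrections : PySem.Dict String String :=
    PySem.Dict.mk [(" .", "."), (" ,", ","), (" !", "!"), (" ?", "?"),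
                   (" :", ":"), (" ;", ";"), ("( ", "("), (" )", ")")]
  corrections.items.foldl (fun t wr => PySem.Str.replace t wr.1 wr.2) text

-- ===== PORT B =====
def correct_punctuation_alt (text : String) : String :=
  let punct : List Char := PySem.Set.ofList ['.', ',', '!', '?', ':', ';', ')']
  let s : List Char := text.toList
  let out : List Char :=
    (PySem.List.enumerate s).foldl
      (fun out ic =>
        if (ic.2 == ' ' &&
            ((decide (0 < ic.1) && (PySem.List.pyGet? s (ic.1 - 1) == some '(')) ||
             (decide (ic.1 + 1 < (s.length : Int)) &&
               ((PySem.List.pyGet? s (ic.1 + 1)).any fun d => punct.contains d)))) = true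
        then out
        else out ++ [ic.2]) []
  String.ofList out

-- ===== PRECONDITION & SPEC =====
def Spec_correct_punctuation (text : String) (out : String) : Prop := out = correct_punctuation_alt text
instance (text : String) (out : String) : Decidable (Spec_correct_punctuation text out) := by unfold Spec_correct_punctuation; infer_instance

-- ===== CLAIM (what is proved, stated in full; the proofs are below) =====
def Claim_equal_correct_punctuation : Prop := ∀ (text : String), Dom_correct_punctuation text → Spec_correct_punctuation text (correct_punctuation text)

-- ===== LEMMAS AND PROOFS =====

-- generic one-sweep non-overlapping replacement of the 2-char pattern [a,b] by [n0]
def repG (a b n0 : Char) : List Char → List Char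
  | [] => []
  | [c] => [c]
  | c :: d :: r => if c = a ∧ d = b then n0 :: repG a b n0 r else c :: repG a b n0 (d :: r)
termination_by l => l.length
decreasing_by all_goals simp

-- the first six stages of A (space before punctuation)
def P6 (s : List Char) : List Char :=
  repG ' ' ';' ';' (repG ' ' ':' ':' (repG ' ' '?' '?' (repG ' ' '!' '!'
    (repG ' ' ',' ',' (repG ' ' '.' '.' s)))))

-- the whole pipeline of A, on characters
def gA (s : List Char) : List Char :=
  repG ' ' ')' ')' (repG '(' ' ' '(' (P6 s))

def pvP7 : List Char := ['.', ',', '!', '?', ':', ';', ')']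

-- the single pass, pattern form (the proof hub)
def fB : List Char → List Char
  | [] => []
  | [c] => [c]
  | c :: d :: r =>
      if c = '(' ∧ d = ' ' then '(' :: fB r
      else if c = ' ' then (if pvP7.contains d then fB (d :: r) else ' ' :: fB (d :: r))
      else c :: fB (d :: r)
termination_by l => l.length
decreasing_by all_goals simp

-- the single pass, carrying the previous original character (matches port B's loop)
def fscan (prev : Option Char) : List Char → List Char
  | [] => []
  | c :: t =>
      if (c == ' ' && ((prev == some '(') || t.head?.any fun d => pvP7.contains d)) = true
      then fscan (some c) t
      else c :: fscan (some c) t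

-- ---- repG equations ----
lemma repG_nil (a b n0 : Char) : repG a b n0 [] = [] := by simp [repG]

lemma repG_single (a b n0 c : Char) : repG a b n0 [c] = [c] := by simp [repG]

lemma repG_cons₂ (a b n0 c d : Char) (r : List Char) :
    repG a b n0 (c :: d :: r) =
      if c = a ∧ d = b then n0 :: repG a b n0 r else c :: repG a b n0 (d :: r) := by
  rw [repG]

lemma repG_pass (a b n0 c : Char) (t : List Char) (h : c ≠ a) :
    repG a b n0 (c :: t) = c :: repG a b n0 t := by
  cases t with
  | nil => simp [repG]
  | cons d r => rw [repG_cons₂]; simp [h]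

lemma repG_fire (a b n0 : Char) (r : List Char) :
    repG a b n0 (a :: b :: r) = n0 :: repG a b n0 r := by
  rw [repG_cons₂]; simp

lemma head_repG (a b n0 : Char) (w : List Char) :
    (repG a b n0 w).head? = w.head? ∨ (repG a b n0 w).head? = some n0 := by
  match w with
  | [] => left; rw [repG_nil]
  | [c] => left; rw [repG_single]
  | c :: d :: r =>
    rw [repG_cons₂]
    by_cases h : c = a ∧ d = b
    · right; simp [h]
    · left; simp [h]

-- space-stage lemmas (a = ' ')
lemma p1_sp (b n0 : Char) (t : List Char) (h : t.head? ≠ some b) :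
    repG ' ' b n0 (' ' :: t) = ' ' :: repG ' ' b n0 t := by
  cases t with
  | nil => simp [repG]
  | cons d r =>
    have hd : ¬ (' ' = ' ' ∧ d = b) := by simp at h; simp [h]
    rw [repG_cons₂, if_neg hd]

lemma p1_sp2 (b n0 d : Char) (t : List Char) (hd : d ≠ ' ') (hdb : d ≠ b) :
    repG ' ' b n0 (' ' :: d :: t) = ' ' :: d :: repG ' ' b n0 t := by
  rw [p1_sp b n0 (d :: t) (by simp [hdb]), repG_pass _ _ _ _ _ hd]

-- paren-stage lemmas (pattern "( ")
lemma p2_paren (t : List Char) (h : t.head? ≠ some ' ') :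
    repG '(' ' ' '(' ('(' :: t) = '(' :: repG '(' ' ' '(' t := by
  cases t with
  | nil => simp [repG]
  | cons d r =>
    have hd : ¬ ('(' = '(' ∧ d = ' ') := by simp at h; simp [h]
    rw [repG_cons₂, if_neg hd]

lemma head_p2 (w : List Char) : (repG '(' ' ' '(' w).head? = w.head? := by
  match w with
  | [] => rw [repG_nil]
  | [c] => rw [repG_single]
  | c :: d :: r =>
    rw [repG_cons₂]
    by_cases h : c = '(' ∧ d = ' '
    · simp [h]
    · simp [h]

-- ---- P6 lemmas ----
lemma P6_pass (c : Char) (t : List Char) (hc : c ≠ ' ') : P6 (c :: t) = c :: P6 t := by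
  simp only [P6]
  rw [repG_pass _ _ _ _ _ hc, repG_pass _ _ _ _ _ hc, repG_pass _ _ _ _ _ hc,
    repG_pass _ _ _ _ _ hc, repG_pass _ _ _ _ _ hc, repG_pass _ _ _ _ _ hc]

lemma head_P6 (t : List Char) :
    (P6 t).head? = t.head? ∨ (P6 t).head? = some '.' ∨ (P6 t).head? = some ',' ∨
    (P6 t).head? = some '!' ∨ (P6 t).head? = some '?' ∨ (P6 t).head? = some ':' ∨
    (P6 t).head? = some ';' := by
  simp only [P6]
  rcases head_repG ' ' ';' ';' (repG ' ' ':' ':' (repG ' ' '?' '?' (repG ' ' '!' '!'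
      (repG ' ' ',' ',' (repG ' ' '.' '.' t))))) with h6 | h6
  · rw [h6]
    rcases head_repG ' ' ':' ':' (repG ' ' '?' '?' (repG ' ' '!' '!'
        (repG ' ' ',' ',' (repG ' ' '.' '.' t)))) with h5 | h5
    · rw [h5]
      rcases head_repG ' ' '?' '?' (repG ' ' '!' '!'
          (repG ' ' ',' ',' (repG ' ' '.' '.' t))) with h4 | h4
      · rw [h4]
        rcases head_repG ' ' '!' '!' (repG ' ' ',' ',' (repG ' ' '.' '.' t)) with h3 | h3
        · rw [h3]
          rcases head_repG ' ' ',' ',' (repG ' ' '.' '.' t) with h2 | h2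
          · rw [h2]
            rcases head_repG ' ' '.' '.' t with h1 | h1
            · rw [h1]; tauto
            · rw [h1]; tauto
          · rw [h2]; tauto
        · rw [h3]; tauto
      · rw [h4]; tauto
    · rw [h5]; tauto
  · rw [h6]; tauto

lemma P6_space (r : List Char) (h : ∀ x ∈ (['.', ',', '!', '?', ':', ';'] : List Char), r.head? ≠ some x) :
    P6 (' ' :: r) = ' ' :: P6 r := by
  simp only [P6]
  -- step 1
  rw [p1_sp '.' '.' r (h '.' (by decide))]
  -- step 2
  have h2 : (repG ' ' '.' '.' r).head? ≠ some ',' := by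
    rcases head_repG ' ' '.' '.' r with hh | hh
    · rw [hh]; exact h ',' (by decide)
    · rw [hh]; decide
  rw [p1_sp ',' ',' _ h2]
  -- step 3
  have h3 : (repG ' ' ',' ',' (repG ' ' '.' '.' r)).head? ≠ some '!' := by
    rcases head_repG ' ' ',' ',' (repG ' ' '.' '.' r) with hh | hh
    · rw [hh]
      rcases head_repG ' ' '.' '.' r with hh' | hh'
      · rw [hh']; exact h '!' (by decide)
      · rw [hh']; decide
    · rw [hh]; decide
  rw [p1_sp '!' '!' _ h3]
  -- step 4
  have h4 : (repG ' ' '!' '!' (repG ' ' ',' ',' (repG ' ' '.' '.' r))).head? ≠ some '?' := by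
    rcases head_repG ' ' '!' '!' (repG ' ' ',' ',' (repG ' ' '.' '.' r)) with hh | hh
    · rw [hh]
      rcases head_repG ' ' ',' ',' (repG ' ' '.' '.' r) with hh' | hh'
      · rw [hh']
        rcases head_repG ' ' '.' '.' r with hh'' | hh''
        · rw [hh'']; exact h '?' (by decide)
        · rw [hh'']; decide
      · rw [hh']; decide
    · rw [hh]; decide
  rw [p1_sp '?' '?' _ h4]
  -- step 5
  have h5 : (repG ' ' '?' '?' (repG ' ' '!' '!' (repG ' ' ',' ',' (repG ' ' '.' '.' r)))).head? ≠ some ':' := by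
    rcases head_repG ' ' '?' '?' (repG ' ' '!' '!' (repG ' ' ',' ',' (repG ' ' '.' '.' r))) with hh | hh
    · rw [hh]
      rcases head_repG ' ' '!' '!' (repG ' ' ',' ',' (repG ' ' '.' '.' r)) with hh' | hh'
      · rw [hh']
        rcases head_repG ' ' ',' ',' (repG ' ' '.' '.' r) with hh'' | hh''
        · rw [hh'']
          rcases head_repG ' ' '.' '.' r with hh''' | hh'''
          · rw [hh''']; exact h ':' (by decide)
          · rw [hh''']; decide
        · rw [hh'']; decide
      · rw [hh']; decide
    · rw [hh]; decide
  rw [p1_sp ':' ':' _ h5]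
  -- step 6
  have h6 : (repG ' ' ':' ':' (repG ' ' '?' '?' (repG ' ' '!' '!' (repG ' ' ',' ','
      (repG ' ' '.' '.' r))))).head? ≠ some ';' := by
    rcases head_repG ' ' ':' ':' (repG ' ' '?' '?' (repG ' ' '!' '!' (repG ' ' ',' ',' (repG ' ' '.' '.' r)))) with hh | hh
    · rw [hh]
      rcases head_repG ' ' '?' '?' (repG ' ' '!' '!' (repG ' ' ',' ',' (repG ' ' '.' '.' r))) with hh' | hh'
      · rw [hh']
        rcases head_repG ' ' '!' '!' (repG ' ' ',' ',' (repG ' ' '.' '.' r)) with hh'' | hh''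
        · rw [hh'']
          rcases head_repG ' ' ',' ',' (repG ' ' '.' '.' r) with hh''' | hh'''
          · rw [hh''']
            rcases head_repG ' ' '.' '.' r with hh'''' | hh''''
            · rw [hh'''']; exact h ';' (by decide)
            · rw [hh'''']; decide
          · rw [hh''']; decide
        · rw [hh'']; decide
      · rw [hh']; decide
    · rw [hh]; decide
  rw [p1_sp ';' ';' _ h6]

lemma P6_sp2 (d : Char) (r : List Char) (hd : d ≠ ' ')
    (h6 : d ∉ (['.', ',', '!', '?', ':', ';'] : List Char)) :
    P6 (' ' :: d :: r) = ' ' :: d :: P6 r := by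
  rw [P6_space (d :: r) (by
      intro x hx
      simp only [List.head?_cons, ne_eq, Option.some.injEq]
      intro he
      exact h6 (by rw [he]; exact hx)), P6_pass d r hd]

lemma P6_fire (e : Char) (r : List Char) (he : e ∈ (['.', ',', '!', '?', ':', ';'] : List Char)) :
    P6 (' ' :: e :: r) = e :: P6 r := by
  simp only [List.mem_cons, List.not_mem_nil, or_false] at he
  rcases he with rfl | rfl | rfl | rfl | rfl | rfl
  · -- '.'
    simp only [P6]
    rw [repG_fire ' ' '.' '.', repG_pass _ _ _ _ _ (by decide : ('.' : Char) ≠ ' '),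
      repG_pass _ _ _ _ _ (by decide : ('.' : Char) ≠ ' '),
      repG_pass _ _ _ _ _ (by decide : ('.' : Char) ≠ ' '),
      repG_pass _ _ _ _ _ (by decide : ('.' : Char) ≠ ' '),
      repG_pass _ _ _ _ _ (by decide : ('.' : Char) ≠ ' ')]
  · -- ','
    simp only [P6]
    rw [p1_sp2 '.' '.' ',' r (by decide) (by decide), repG_fire ' ' ',' ',',
      repG_pass _ _ _ _ _ (by decide : (',' : Char) ≠ ' '),
      repG_pass _ _ _ _ _ (by decide : (',' : Char) ≠ ' '),
      repG_pass _ _ _ _ _ (by decide : (',' : Char) ≠ ' '),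
      repG_pass _ _ _ _ _ (by decide : (',' : Char) ≠ ' ')]
  · -- '!'
    simp only [P6]
    rw [p1_sp2 '.' '.' '!' r (by decide) (by decide),
      p1_sp2 ',' ',' '!' _ (by decide) (by decide), repG_fire ' ' '!' '!',
      repG_pass _ _ _ _ _ (by decide : ('!' : Char) ≠ ' '),
      repG_pass _ _ _ _ _ (by decide : ('!' : Char) ≠ ' '),
      repG_pass _ _ _ _ _ (by decide : ('!' : Char) ≠ ' ')]
  · -- '?'
    simp only [P6]
    rw [p1_sp2 '.' '.' '?' r (by decide) (by decide),
      p1_sp2 ',' ',' '?' _ (by decide) (by decide),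
      p1_sp2 '!' '!' '?' _ (by decide) (by decide), repG_fire ' ' '?' '?',
      repG_pass _ _ _ _ _ (by decide : ('?' : Char) ≠ ' '),
      repG_pass _ _ _ _ _ (by decide : ('?' : Char) ≠ ' ')]
  · -- ':'
    simp only [P6]
    rw [p1_sp2 '.' '.' ':' r (by decide) (by decide),
      p1_sp2 ',' ',' ':' _ (by decide) (by decide),
      p1_sp2 '!' '!' ':' _ (by decide) (by decide),
      p1_sp2 '?' '?' ':' _ (by decide) (by decide), repG_fire ' ' ':' ':',
      repG_pass _ _ _ _ _ (by decide : (':' : Char) ≠ ' ')]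
  · -- ';'
    simp only [P6]
    rw [p1_sp2 '.' '.' ';' r (by decide) (by decide),
      p1_sp2 ',' ',' ';' _ (by decide) (by decide),
      p1_sp2 '!' '!' ';' _ (by decide) (by decide),
      p1_sp2 '?' '?' ';' _ (by decide) (by decide),
      p1_sp2 ':' ':' ';' _ (by decide) (by decide), repG_fire ' ' ';' ';']

lemma head_P6_ne (t : List Char) (y : Char) (hy : y ∉ (['.', ',', '!', '?', ':', ';'] : List Char))
    (h : t.head? ≠ some y) : (P6 t).head? ≠ some y := by
  rcases head_P6 t with hh | hh | hh | hh | hh | hh | hh <;> rw [hh]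
  · exact h
  all_goals (simp; intro he; apply hy; (rw [← he]; decide))

lemma mem6 (d : Char) (hd : d ∈ (['.', ',', '!', '?', ':', ';'] : List Char)) :
    d ≠ '(' ∧ d ≠ ' ' ∧ d ≠ ')' ∧ pvP7.contains d = true := by
  simp only [List.mem_cons, List.not_mem_nil, or_false] at hd
  rcases hd with rfl | rfl | rfl | rfl | rfl | rfl <;> exact ⟨by decide, by decide, by decide, by decide⟩

-- ---- gA case lemmas ----
lemma P6_nil : P6 [] = [] := by simp only [P6, repG_nil]

lemma P6_single (c : Char) : P6 [c] = [c] := by simp only [P6, repG_single]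

lemma gA_nil : gA [] = [] := by simp only [gA, P6_nil, repG_nil]

lemma gA_single (c : Char) : gA [c] = [c] := by
  simp only [gA, P6_single, repG_single]

lemma gA_pass (c : Char) (t : List Char) (h1 : c ≠ ' ') (h2 : c ≠ '(') :
    gA (c :: t) = c :: gA t := by
  simp only [gA]
  rw [P6_pass c t h1, repG_pass _ _ _ _ _ h2, repG_pass _ _ _ _ _ h1]

lemma gA_paren (t : List Char) (h : t.head? ≠ some ' ') : gA ('(' :: t) = '(' :: gA t := by
  simp only [gA]
  rw [P6_pass '(' t (by decide),
    p2_paren (P6 t) (head_P6_ne t ' ' (by decide) h),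
    repG_pass _ _ _ _ _ (by decide : ('(' : Char) ≠ ' ')]

lemma gA_fire6 (d : Char) (r : List Char) (hd : d ∈ (['.', ',', '!', '?', ':', ';'] : List Char)) :
    gA (' ' :: d :: r) = d :: gA r := by
  have hd1 : d ≠ '(' := (mem6 d hd).1
  have hd2 : d ≠ ' ' := (mem6 d hd).2.1
  simp only [gA]
  rw [P6_fire d r hd, repG_pass _ _ _ _ _ hd1, repG_pass _ _ _ _ _ hd2]

lemma gA_rparen (r : List Char) : gA (' ' :: ')' :: r) = ')' :: gA r := by
  simp only [gA]
  rw [P6_sp2 ')' r (by decide) (by decide),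
    repG_pass _ _ _ _ _ (by decide : (' ' : Char) ≠ '('),
    repG_pass _ _ _ _ _ (by decide : (')' : Char) ≠ '('),
    repG_fire ' ' ')' ')']

lemma gA_spsp (r : List Char) : gA (' ' :: ' ' :: r) = ' ' :: gA (' ' :: r) := by
  simp only [gA]
  rw [P6_space (' ' :: r) (by intro x hx; simp; intro he; rw [← he] at hx; revert hx; decide),
    repG_pass _ _ _ _ _ (by decide : (' ' : Char) ≠ '(')]
  rw [p1_sp ')' ')' _ (by rw [head_p2]; exact head_P6_ne (' ' :: r) ')' (by decide) (by simp))]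

lemma gA_spparen (r : List Char) : gA (' ' :: '(' :: r) = ' ' :: gA ('(' :: r) := by
  simp only [gA]
  rw [P6_sp2 '(' r (by decide) (by decide),
    repG_pass _ _ _ _ _ (by decide : (' ' : Char) ≠ '('), ← P6_pass '(' r (by decide)]
  rw [p1_sp ')' ')' _ (by rw [head_p2]; exact head_P6_ne ('(' :: r) ')' (by decide) (by simp))]

lemma gA_spother (d : Char) (r : List Char) (h1 : d ≠ ' ') (h2 : d ≠ '(') (h3 : d ≠ ')')
    (h6 : d ∉ (['.', ',', '!', '?', ':', ';'] : List Char)) :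
    gA (' ' :: d :: r) = ' ' :: d :: gA r := by
  simp only [gA]
  rw [P6_sp2 d r h1 h6,
    repG_pass _ _ _ _ _ (by decide : (' ' : Char) ≠ '('), repG_pass _ _ _ _ _ h2,
    p1_sp2 ')' ')' d _ h1 h3]

-- the "(  " block cases
lemma gA_ps_nil : gA ['(', ' '] = ['('] := by
  simp only [gA]
  rw [show (['(', ' '] : List Char) = '(' :: [' '] from rfl, P6_pass '(' [' '] (by decide),
    P6_single, repG_fire '(' ' ' '(', repG_nil, repG_single]

lemma gA_ps_fire (e : Char) (r2 : List Char) (he : e ∈ (['.', ',', '!', '?', ':', ';'] : List Char)) :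
    gA ('(' :: ' ' :: e :: r2) = '(' :: e :: gA r2 := by
  have he1 : e ≠ ' ' := (mem6 e he).2.1
  have he2 : e ≠ '(' := (mem6 e he).1
  simp only [gA]
  rw [P6_pass '(' _ (by decide), P6_fire e r2 he,
    p2_paren (e :: P6 r2) (by simp [he1]), repG_pass _ _ _ _ _ he2,
    repG_pass _ _ _ _ _ (by decide : ('(' : Char) ≠ ' '), repG_pass _ _ _ _ _ he1]

lemma gA_ps_rparen (r2 : List Char) : gA ('(' :: ' ' :: ')' :: r2) = '(' :: ')' :: gA r2 := by
  simp only [gA]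
  rw [P6_pass '(' _ (by decide), P6_sp2 ')' r2 (by decide) (by decide),
    repG_fire '(' ' ' '(', repG_pass _ _ _ _ _ (by decide : (')' : Char) ≠ '('),
    repG_pass _ _ _ _ _ (by decide : ('(' : Char) ≠ ' '),
    repG_pass _ _ _ _ _ (by decide : (')' : Char) ≠ ' ')]

lemma gA_ps_sp (r2 : List Char) : gA ('(' :: ' ' :: ' ' :: r2) = '(' :: gA (' ' :: r2) := by
  simp only [gA]
  rw [P6_pass '(' _ (by decide),
    P6_space (' ' :: r2) (by intro x hx; simp; intro he; rw [← he] at hx; revert hx; decide),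
    repG_fire '(' ' ' '(',
    repG_pass _ _ _ _ _ (by decide : ('(' : Char) ≠ ' ')]

lemma gA_ps_paren (r2 : List Char) : gA ('(' :: ' ' :: '(' :: r2) = '(' :: gA ('(' :: r2) := by
  simp only [gA]
  rw [P6_pass '(' (' ' :: '(' :: r2) (by decide), P6_sp2 '(' r2 (by decide) (by decide),
    repG_fire '(' ' ' '(', ← P6_pass '(' r2 (by decide),
    repG_pass _ _ _ _ _ (by decide : ('(' : Char) ≠ ' ')]

lemma gA_ps_other (e : Char) (r2 : List Char) (h1 : e ≠ ' ') (h2 : e ≠ '(') (_h3 : e ≠ ')')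
    (h6 : e ∉ (['.', ',', '!', '?', ':', ';'] : List Char)) :
    gA ('(' :: ' ' :: e :: r2) = '(' :: e :: gA r2 := by
  simp only [gA]
  rw [P6_pass '(' _ (by decide), P6_sp2 e r2 h1 h6,
    repG_fire '(' ' ' '(', repG_pass _ _ _ _ _ h2,
    repG_pass _ _ _ _ _ (by decide : ('(' : Char) ≠ ' '), repG_pass _ _ _ _ _ h1]

-- ---- fB lemmas ----
lemma fB_nil : fB [] = [] := by simp [fB]

lemma fB_single (c : Char) : fB [c] = [c] := by simp [fB]

lemma fB_parensp (r : List Char) : fB ('(' :: ' ' :: r) = '(' :: fB r := by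
  rw [fB]; simp

lemma fB_sp (d : Char) (r : List Char) :
    fB (' ' :: d :: r) = if pvP7.contains d then fB (d :: r) else ' ' :: fB (d :: r) := by
  rw [fB]; simp

lemma fB_pass (c : Char) (t : List Char) (h1 : c ≠ ' ') (h2 : ¬(c = '(' ∧ t.head? = some ' ')) :
    fB (c :: t) = c :: fB t := by
  cases t with
  | nil => rw [fB_single, fB_nil]
  | cons d r =>
    have h2' : ¬ (c = '(' ∧ d = ' ') := by
      intro hh
      exact h2 ⟨hh.1, by simp [hh.2]⟩
    rw [fB, if_neg h2', if_neg h1]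

-- ---- main equivalence of the two character pipelines ----
lemma gA_fB : ∀ (n : Nat) (s : List Char), s.length ≤ n → gA s = fB s := by
  intro n
  induction n with
  | zero =>
    intro s hs
    have : s = [] := List.eq_nil_of_length_eq_zero (Nat.le_zero.mp hs)
    rw [this, gA_nil, fB_nil]
  | succ n IH =>
    intro s hs
    match s with
    | [] => rw [gA_nil, fB_nil]
    | [c] => rw [gA_single, fB_single]
    | c :: d :: r =>
      have hlen : r.length + 2 ≤ n + 1 := by simpa using hs
      have hr : r.length ≤ n := by omega
      have hdr : (d :: r).length ≤ n := by simp; omega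
      by_cases hc : c = ' '
      · subst hc
        by_cases hd6 : d ∈ (['.', ',', '!', '?', ':', ';'] : List Char)
        · have hcont : pvP7.contains d = true := (mem6 d hd6).2.2.2
          have hd1 : d ≠ ' ' := (mem6 d hd6).2.1
          have hd2 : d ≠ '(' := (mem6 d hd6).1
          rw [gA_fire6 d r hd6, fB_sp d r, if_pos hcont,
            fB_pass d r hd1 (by simp [hd2]), IH r hr]
        · by_cases hdp : d = ')'
          · subst hdp
            rw [gA_rparen, fB_sp ')' r, if_pos (by decide),
              fB_pass ')' r (by decide) (by simp), IH r hr]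
          · have hcont : pvP7.contains d = false := by
              simp [pvP7]
              simp at hd6
              refine ⟨hd6.1, hd6.2.1, hd6.2.2.1, hd6.2.2.2.1, hd6.2.2.2.2.1, hd6.2.2.2.2.2, hdp⟩
            by_cases hdsp : d = ' '
            · subst hdsp
              rw [gA_spsp, fB_sp ' ' r, if_neg (by rw [hcont]; simp),
                IH (' ' :: r) hdr]
            · by_cases hdpa : d = '('
              · subst hdpa
                rw [gA_spparen, fB_sp '(' r, if_neg (by rw [hcont]; simp),
                  IH ('(' :: r) hdr]
              · rw [gA_spother d r hdsp hdpa hdp hd6, fB_sp d r,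
                  if_neg (by rw [hcont]; simp), fB_pass d r hdsp (by simp [hdpa]), IH r hr]
      · by_cases hcp : c = '('
        · subst hcp
          by_cases hd : d = ' '
          · subst hd
            match r with
            | [] => rw [gA_ps_nil, fB_parensp, fB_nil]
            | e :: r2 =>
              have hr2 : r2.length ≤ n := by simp at hlen; omega
              have her2 : (e :: r2).length ≤ n := by simp at hlen ⊢; omega
              by_cases he6 : e ∈ (['.', ',', '!', '?', ':', ';'] : List Char)
              · have he1 : e ≠ ' ' := (mem6 e he6).2.1
                have he2 : e ≠ '(' := (mem6 e he6).1
                rw [gA_ps_fire e r2 he6, fB_parensp, fB_pass e r2 he1 (by simp [he2]),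
                  IH r2 hr2]
              · by_cases hep : e = ')'
                · subst hep
                  rw [gA_ps_rparen, fB_parensp, fB_pass ')' r2 (by decide) (by simp),
                    IH r2 hr2]
                · by_cases hesp : e = ' '
                  · subst hesp
                    rw [gA_ps_sp, fB_parensp, IH (' ' :: r2) her2]
                  · by_cases hepa : e = '('
                    · subst hepa
                      rw [gA_ps_paren, fB_parensp, IH ('(' :: r2) her2]
                    · rw [gA_ps_other e r2 hesp hepa hep he6, fB_parensp,
                        fB_pass e r2 hesp (by simp [hepa]), IH r2 hr2]
          · rw [gA_paren (d :: r) (by simp [hd]), fB_pass '(' (d :: r) (by decide) (by simp [hd]),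
              IH (d :: r) hdr]
        · rw [gA_pass c (d :: r) hc hcp, fB_pass c (d :: r) hc (by simp [hcp]),
            IH (d :: r) hdr]

-- ---- A-side bridge: the port equals gA on characters ----
lemma go_repG (a b n0 : Char) :
    ∀ (fuel : Nat) (l acc : List Char), l.length ≤ fuel →
      PySem.Chars.replace.go [a, b] [n0] fuel l acc = acc.reverse ++ repG a b n0 l := by
  intro fuel
  induction fuel with
  | zero =>
    intro l acc hl
    have : l = [] := List.eq_nil_of_length_eq_zero (Nat.le_zero.mp hl)
    subst this
    simp [PySem.Chars.replace.go, repG_nil]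
  | succ fuel IH =>
    intro l acc hl
    match l with
    | [] => simp [PySem.Chars.replace.go, repG_nil]
    | [c] =>
      have hpre : [a, b].isPrefixOf [c] = false := by simp [List.isPrefixOf]
      rw [PySem.Chars.replace.go]
      simp only [hpre]
      rw [IH [] (c :: acc) (by simp)]
      simp [repG_nil, repG_single]
    | c :: d :: r =>
      rw [PySem.Chars.replace.go]
      by_cases h : c = a ∧ d = b
      · have hpre : [a, b].isPrefixOf (c :: d :: r) = true := by
          simp [List.isPrefixOf, h.1, h.2]
        simp only [hpre]
        rw [show ([a, b].length : Nat) = 2 from rfl]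
        rw [show List.drop 2 (c :: d :: r) = r from rfl]
        rw [IH r (([n0].reverse) ++ acc) (by simp at hl ⊢; omega)]
        rw [repG_cons₂, if_pos h]
        simp
      · have hpre : [a, b].isPrefixOf (c :: d :: r) = false := by
          simp [List.isPrefixOf]
          intro h1 h2
          exact absurd ⟨h1.symm, h2.symm⟩ h
        simp only [hpre]
        rw [IH (d :: r) (c :: acc) (by simp at hl ⊢; omega)]
        rw [repG_cons₂, if_neg h]
        simp
      
lemma replace_repG (a b n0 : Char) (s : List Char) :
    PySem.Chars.replace s [a, b] [n0] = repG a b n0 s := by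
  rw [PySem.Chars.replace]
  simp only [List.isEmpty_cons, if_false, Bool.false_eq_true]
  rw [go_repG a b n0 s.length s [] le_rfl]
  simp

lemma A_unfold (text : String) : correct_punctuation text =
    PySem.Str.replace (PySem.Str.replace (PySem.Str.replace (PySem.Str.replace
      (PySem.Str.replace (PySem.Str.replace (PySem.Str.replace (PySem.Str.replace
        text " ." ".") " ," ",") " !" "!") " ?" "?") " :" ":") " ;" ";") "( " "(") " )" ")" := rfl

lemma A_eq (text : String) : correct_punctuation text = String.ofList (gA text.toList) := by
  rw [A_unfold]
  simp only [PySem.Str.replace, String.toList_ofList]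
  rw [show (" ." : String).toList = [' ', '.'] from by decide,
    show ("." : String).toList = ['.'] from by decide,
    show (" ," : String).toList = [' ', ','] from by decide,
    show ("," : String).toList = [','] from by decide,
    show (" !" : String).toList = [' ', '!'] from by decide,
    show ("!" : String).toList = ['!'] from by decide,
    show (" ?" : String).toList = [' ', '?'] from by decide,
    show ("?" : String).toList = ['?'] from by decide,
    show (" :" : String).toList = [' ', ':'] from by decide,
    show (":" : String).toList = [':'] from by decide,
    show (" ;" : String).toList = [' ', ';'] from by decide,
    show (";" : String).toList = [';'] from by decide,
    show ("( " : String).toList = ['(', ' '] from by decide,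
    show ("(" : String).toList = ['('] from by decide,
    show (" )" : String).toList = [' ', ')'] from by decide,
    show (")" : String).toList = [')'] from by decide]
  simp only [replace_repG]
  rfl

-- ---- B-side bridge: the port equals fscan none on characters ----
lemma altE (s : List Char) :
    ∀ (t : List Char) (i : Nat) (acc : List Char), List.drop i s = t →
      (PySem.List.enumerate t (i : Int)).foldl
        (fun out ic =>
          if (ic.2 == ' ' &&
              ((decide (0 < ic.1) && (PySem.List.pyGet? s (ic.1 - 1) == some '(')) ||
               (decide (ic.1 + 1 < (s.length : Int)) &&
                 ((PySem.List.pyGet? s (ic.1 + 1)).any fun d =>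
                   (PySem.Set.ofList ['.', ',', '!', '?', ':', ';', ')'] : List Char).contains d)))) = true
          then out
          else out ++ [ic.2]) acc
      = acc ++ fscan (if i = 0 then none else s[i - 1]?) t := by
  intro t
  induction t with
  | nil => intro i acc _; simp [PySem.List.enumerate, fscan]
  | cons c t' IHt =>
    intro i acc h
    have hi : i < s.length := by
      by_contra hge
      rw [List.drop_eq_nil_of_le (by omega)] at h
      exact List.cons_ne_nil c t' h.symm
    have hget : s[i]? = some c := by
      have h0 := List.getElem?_drop (xs := s) (i := i) (j := 0)
      rw [h] at h0; simpa using h0.symm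
    have hnext : s[i + 1]? = t'.head? := by
      have h0 := List.getElem?_drop (xs := s) (i := i) (j := 1)
      rw [h] at h0
      rw [List.head?_eq_getElem?]
      simpa using h0.symm
    have hdrop : List.drop (i + 1) s = t' := by
      have h1 : List.drop 1 (List.drop i s) = t' := by rw [h]; rfl
      rwa [List.drop_drop] at h1
    rw [PySem.List.enumerate_cons,
      show ((i : Int) + 1) = ((i + 1 : Nat) : Int) from by push_cast; ring,
      List.foldl_cons]
    have hprevEq : (decide (0 < (i : Int)) && (PySem.List.pyGet? s ((i : Int) - 1) == some '(')) =
        ((if i = 0 then none else s[i - 1]?) == some '(') := by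
      rcases Nat.eq_zero_or_pos i with h0 | h0
      · subst h0; simp
      · have hc : ((i : Int) - 1) = ((i - 1 : Nat) : Int) := by omega
        rw [hc, PySem.List.pyGet?_natCast]
        simp [Nat.pos_iff_ne_zero.mp h0, h0]
    have hnextEq : (decide ((i : Int) + 1 < (s.length : Int)) &&
        ((PySem.List.pyGet? s ((i : Int) + 1)).any fun d =>
          (PySem.Set.ofList ['.', ',', '!', '?', ':', ';', ')'] : List Char).contains d)) =
        (t'.head?.any fun d => pvP7.contains d) := by
      have hcast : ((i : Int) + 1) = ((i + 1 : Nat) : Int) := by push_cast; ring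
      rw [hcast, PySem.List.pyGet?_natCast, hnext]
      have hset : (PySem.Set.ofList ['.', ',', '!', '?', ':', ';', ')'] : List Char) = pvP7 := by
        decide
      rw [hset]
      have hlen : s.length = i + 1 + t'.length := by
        have h1 := congrArg List.length h
        simp [List.length_drop] at h1
        omega
      cases t' with
      | nil =>
        have hge : ¬ (i + 1 < s.length) := by rw [hlen]; simp
        have hd : decide (((i + 1 : Nat) : Int) < (s.length : Int)) = false := by
          simp only [decide_eq_false_iff_not]
          intro hc
          exact hge (by exact_mod_cast hc)
        rw [hd]
        simp
      | cons e r =>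
        have hlt : i + 1 < s.length := by rw [hlen]; simp
        have hd : decide (((i + 1 : Nat) : Int) < (s.length : Int)) = true := by
          simp only [decide_eq_true_eq]
          exact_mod_cast hlt
        rw [hd]
        simp
    simp only
    rw [hprevEq, hnextEq, fscan]
    have hifprev : (if i + 1 = 0 then none else s[i + 1 - 1]?) = some c := by
      simp [hget]
    by_cases hcond : (c == ' ' &&
        (((if i = 0 then none else s[i - 1]?) == some '(') ||
          t'.head?.any fun d => pvP7.contains d)) = true
    · rw [if_pos hcond, if_pos hcond]
      rw [IHt (i + 1) acc hdrop, hifprev]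
    · rw [if_neg hcond, if_neg hcond]
      rw [IHt (i + 1) (acc ++ [c]) hdrop, hifprev]
      simp

lemma alt_eq (text : String) :
    correct_punctuation_alt text = String.ofList (fscan none text.toList) := by
  simp only [correct_punctuation_alt]
  exact congrArg String.ofList ((altE text.toList text.toList 0 [] (by simp)).trans (by simp))

-- ---- fscan equals fB ----
lemma fB_paren_cons (t : List Char) : fB ('(' :: t) = '(' :: (fB ('(' :: t)).tail := by
  cases t with
  | nil => rw [fB_single]; rfl
  | cons d r =>
    by_cases hd : d = ' '
    · subst hd; rw [fB_parensp]; rfl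
    · rw [fB_pass '(' (d :: r) (by decide) (by simp [hd])]
      rfl

lemma fscan_fB : ∀ (s : List Char) (prev : Option Char),
    fscan prev s = if prev = some '(' then (fB ('(' :: s)).tail else fB s := by
  intro s
  induction s with
  | nil =>
    intro prev
    rw [fscan]
    split
    · rw [fB_single]
      rfl
    · rw [fB_nil]
  | cons c t IHs =>
    intro prev
    rw [fscan]
    by_cases hc : c = ' '
    · subst hc
      by_cases hp : prev = some '('
      · subst hp
        rw [if_pos (by simp), IHs (some ' '), if_neg (by decide), if_pos rfl, fB_parensp]
        rfl
      · have hpb : (prev == some '(') = false := by simpa using hp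
        rw [if_neg hp]
        rw [show ((' ' == ' ' && ((prev == some '(') || t.head?.any fun d => pvP7.contains d))) =
            (t.head?.any fun d => pvP7.contains d) from by rw [hpb]; simp]
        cases t with
        | nil =>
          rw [show ((List.head? ([] : List Char)).any fun d => pvP7.contains d) = false from rfl]
          rw [if_neg (by simp), IHs (some ' '), if_neg (by decide), fB_single, fB_nil]
        | cons d r =>
          rw [show ((List.head? (d :: r)).any fun d => pvP7.contains d) = pvP7.contains d from by simp]
          by_cases hdc : pvP7.contains d = true
          · rw [if_pos hdc, IHs (some ' '), if_neg (by decide), fB_sp d r, if_pos hdc]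
          · rw [if_neg hdc, IHs (some ' '), if_neg (by decide), fB_sp d r, if_neg hdc]
    · have hcb : (c == ' ') = false := by simpa using hc
      rw [if_neg (by simp [hcb]), IHs (some c)]
      by_cases hcp : c = '('
      · subst hcp
        rw [if_pos rfl, ← fB_paren_cons t]
        by_cases hp : prev = some '('
        · rw [if_pos hp, fB_pass '(' ('(' :: t) (by decide) (by simp)]
          rfl
        · rw [if_neg hp]
      · rw [if_neg (by simp [hcp])]
        by_cases hp : prev = some '('
        · rw [if_pos hp, fB_pass '(' (c :: t) (by decide) (by simp [hc]),
            fB_pass c t hc (by simp [hcp])]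
          rfl
        · rw [if_neg hp, fB_pass c t hc (by simp [hcp])]

-- ===== VERDICT (by name: the statement is the Claim_ definition above) =====
theorem correct_punctuation_spec : Claim_equal_correct_punctuation := by
  intro text _
  unfold Spec_correct_punctuation
  rw [A_eq, alt_eq, gA_fB (text.toList.length) text.toList le_rfl]
  rw [fscan_fB text.toList none, if_neg (by decide)]
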